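-- pv_equiv track=rewrite | github.com/TheNightech/Resolveur-Mots-Meles | python/find_words.py | prepare_grid
-- ===== SOURCE A (Python) =====
-- def prepare_grid(grid, mots):
--
--     nb_lignes = len(grid)
--     # Enlever les espaces et les tabulations dans la grille
--     for i in range(nb_lignes):
--         grid[i] = grid[i].replace(" ", "").replace("\t", "")
--
--     # Création des colonnes
--     colonnes = []
--     for i in range(nb_lignes):
--         colonnes.append("")
--         for l in range(len(grid[0])):
--             colonnes[i] += grid[l][i]
--
--     # Création des diagonales (de haut-gauche à bas-droite)
--     diagonales_hg_bd = []
--     # diagonales commençant sur la première colonne, du bas vers le haut (petites -> grandes)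
--     for i in range(nb_lignes - 1, -1, -1):
--         diag = ""
--         x, y = i, 0
--         while x < nb_lignes and y < nb_lignes:
--             diag += grid[x][y]
--             x += 1
--             y += 1
--         diagonales_hg_bd.append(diag)
--
--     # diagonales commençant sur la première ligne (sauf la première case), de gauche vers la droite (grandes -> petites)
--     for j in range(1, nb_lignes):
--         diag = ""
--         x, y = 0, j
--         while x < nb_lignes and y < nb_lignes:
--             diag += grid[x][y]
--             x += 1
--             y += 1
--         diagonales_hg_bd.append(diag)
--
--     # Création des diagonales (de haut-droite à bas-gauche)
--     diagonales_hd_bg = []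
--     # diagonales commençant sur la dernière colonne, du bas vers le haut (petites -> grandes)
--     for i in range(nb_lignes - 1, -1, -1):
--         diag = ""
--         x, y = i, nb_lignes - 1
--         while x < nb_lignes and y >= 0:
--             diag += grid[x][y]
--             x += 1
--             y -= 1
--         diagonales_hd_bg.append(diag)
--
--     # diagonales commençant sur la première ligne (sauf la dernière case), de droite vers la gauche (grandes -> petites)
--     for j in range(nb_lignes - 2, -1, -1):
--         diag = ""
--         x, y = 0, j
--         while x < nb_lignes and y >= 0:
--             diag += grid[x][y]
--             x += 1
--             y -= 1
--         diagonales_hd_bg.append(diag)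
--
--     return colonnes, diagonales_hg_bd, diagonales_hd_bg
-- ===== SOURCE B (Python) =====
-- def prepare_grid(grid, mots):
--     n = len(grid)
--     # same in-place cleanup as A (mutates grid)
--     for i in range(n):
--         grid[i] = grid[i].replace(" ", "").replace("\t", "")
--
--     # columns kept as in A (index-based), written as a join comprehension
--     colonnes = ["".join(grid[l][i] for l in range(len(grid[0]))) for i in range(n)]
--
--     # one pass over the n*n square, bucketing by the two diagonal keys
--     d1 = {}  # key x - y  (top-left -> bottom-right diagonals)
--     d2 = {}  # key x + y  (top-right -> bottom-left diagonals)
--     for x in range(n):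
--         row = grid[x]
--         for y in range(n):
--             c = row[y]
--             d1[x - y] = d1.get(x - y, "") + c
--             d2[x + y] = d2.get(x + y, "") + c
--
--     diagonales_hg_bd = [d1.get(k, "") for k in range(n - 1, -n, -1)]
--     diagonales_hd_bg = [d2.get(k, "") for k in range(2 * n - 2, -1, -1)]
--     return colonnes, diagonales_hg_bd, diagonales_hd_bg
-- ===== Notes on version B (the rewrite author's own statement) =====
-- stated objective: alternative
-- what changed: A walks each diagonal with its own while-loop from 2*(2n-1) start points; B makes one pass over the n x n square bucketing each cell into two dicts keyed by x-y and x+y and reads the diagonals off the buckets in descending key order; the column construction and the in-place cleanup are kept.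
import Mathlib
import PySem

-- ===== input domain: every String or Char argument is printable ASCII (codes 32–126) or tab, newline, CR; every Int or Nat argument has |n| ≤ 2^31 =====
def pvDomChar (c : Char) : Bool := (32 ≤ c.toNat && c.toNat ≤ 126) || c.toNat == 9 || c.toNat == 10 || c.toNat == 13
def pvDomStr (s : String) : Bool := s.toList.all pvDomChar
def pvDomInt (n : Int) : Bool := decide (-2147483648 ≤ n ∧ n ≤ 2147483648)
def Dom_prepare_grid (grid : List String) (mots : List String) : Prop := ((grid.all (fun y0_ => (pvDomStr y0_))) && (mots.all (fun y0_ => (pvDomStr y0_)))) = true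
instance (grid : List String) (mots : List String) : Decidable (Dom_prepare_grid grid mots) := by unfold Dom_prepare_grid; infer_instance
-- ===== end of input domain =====

-- B replaces A's four per-diagonal walking loops by one pass over the square that buckets each
-- cell into two dicts keyed by x-y and x+y; the column construction and the in-place cleanup are
-- kept as in A. Both Pythons mutate `grid` in place the same way; the theorems are about the
-- return value.

-- ===== PORT A =====
def pvStripA (s : String) : String :=
  PySem.Str.replace (PySem.Str.replace s " " "") "\t" ""

-- grid[x][y]; always in range on inputs admitted by Pre_ (the default is never read there)
def pvCellA (g : List String) (x y : Nat) : Char :=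
  (g[x]?.getD "").toList[y]?.getD ' '

-- while x < n and y < n: diag += grid[x][y]; x += 1; y += 1
def pvDiag1A (g : List String) (n x y : Nat) (acc : List Char) : List Char :=
  if _h : x < n ∧ y < n then
    pvDiag1A g n (x + 1) (y + 1) (acc ++ [pvCellA g x y])
  else acc
termination_by n - x
decreasing_by omega

-- while x < n and y >= 0: diag += grid[x][y]; x += 1; y -= 1
def pvDiag2A (g : List String) (n x : Nat) (y : Int) (acc : List Char) : List Char :=
  if _h : x < n ∧ 0 ≤ y then
    pvDiag2A g n (x + 1) (y - 1) (acc ++ [pvCellA g x y.toNat])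
  else acc
termination_by n - x
decreasing_by omega

def prepare_grid (grid : List String) (mots : List String) : List String × List String × List String :=
  let n := grid.length
  let g := grid.map pvStripA
  let len0 := (g[0]?.getD "").toList.length
  let colonnes := (List.range n).map (fun i =>
    String.ofList ((List.range len0).foldl (fun acc l => acc ++ [pvCellA g l i]) []))
  -- range(n-1, -1, -1) = (List.range n).reverse ; range(1, n) = List.range' 1 (n-1)
  let d_hg := ((List.range n).reverse.map (fun i => String.ofList (pvDiag1A g n i 0 [])))
      ++ ((List.range' 1 (n - 1)).map (fun j => String.ofList (pvDiag1A g n 0 j [])))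
  -- range(n-2, -1, -1) = (List.range (n-1)).reverse
  let d_hd := ((List.range n).reverse.map (fun i => String.ofList (pvDiag2A g n i ((n : Int) - 1) [])))
      ++ ((List.range (n - 1)).reverse.map (fun (j : Nat) => String.ofList (pvDiag2A g n 0 (j : Int) [])))
  (colonnes, d_hg, d_hd)

-- ===== PORT B =====
def prepare_grid_alt (grid : List String) (mots : List String) : List String × List String × List String :=
  let n := grid.length
  let g := grid.map pvStripA
  -- "".join(grid[l][i] for l in range(len(grid[0]))) for i in range(n)
  let colonnes := (List.range n).map (fun i =>
    String.ofList ((List.range ((g[0]?.getD "").toList.length)).map (fun l => pvCellA g l i)))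
  let dd := (List.range n).foldl (fun dd x =>
      (List.range n).foldl (fun dd y =>
        (dd.1.modify ((x : Int) - (y : Int)) [] (· ++ [pvCellA g x y]),
         dd.2.modify ((x : Int) + (y : Int)) [] (· ++ [pvCellA g x y]))) dd)
    ((PySem.Dict.empty, PySem.Dict.empty) :
      PySem.Dict Int (List Char) × PySem.Dict Int (List Char))
  let d_hg := (PySem.List.pyRange ((n : Int) - 1) (-(n : Int)) (-1)).map
      (fun k => String.ofList (dd.1.getD k []))
  let d_hd := (PySem.List.pyRange (2 * (n : Int) - 2) (-1) (-1)).map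
      (fun k => String.ofList (dd.2.getD k []))
  (colonnes, d_hg, d_hd)

-- ===== PRECONDITION & SPEC =====
-- Pre_ excludes exactly the inputs on which A (and B) raises IndexError: a cleaned row shorter
-- than the number of rows, or a cleaned first row longer than the number of rows.
def Pre_prepare_grid (grid : List String) (mots : List String) : Prop :=
  (∀ s ∈ grid, grid.length ≤ (pvStripA s).toList.length) ∧
  (∀ s ∈ grid.take 1, (pvStripA s).toList.length ≤ grid.length)
instance (grid : List String) (mots : List String) : Decidable (Pre_prepare_grid grid mots) := by
  unfold Pre_prepare_grid; infer_instance

def pvWitness_prepare_grid : List String × List String := (["a bc", "d ef", "g\thi"], ["ab"])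

def Spec_prepare_grid (grid : List String) (mots : List String) (out : List String × List String × List String) : Prop := out = prepare_grid_alt grid mots
instance (grid : List String) (mots : List String) (out : List String × List String × List String) : Decidable (Spec_prepare_grid grid mots out) := by unfold Spec_prepare_grid; infer_instance

-- ===== CLAIM (what is proved, stated in full; the proofs are below) =====
def Claim_equal_prepare_grid : Prop := ∀ (grid : List String) (mots : List String), Dom_prepare_grid grid mots → Pre_prepare_grid grid mots → Spec_prepare_grid grid mots (prepare_grid grid mots)

-- ===== LEMMAS AND PROOFS =====

theorem reverse_range (n : Nat) :
    (List.range n).reverse = (List.range n).map (fun t => n - 1 - t) := by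
  induction n with
  | zero => rfl
  | succ n ih =>
    conv_lhs => rw [List.range_succ]
    rw [List.reverse_append, ih]
    conv_rhs => rw [List.range_succ_eq_map]
    simp only [List.reverse_singleton, List.singleton_append, List.map_cons, List.map_map]
    refine List.cons_eq_cons.mpr ⟨by omega, ?_⟩
    exact List.map_congr_left (fun t ht => by simp only [Function.comp]; omega)

theorem flatMap_range_if {α : Type} (f : Nat → α) (lo hi : Nat) (n : Nat) :
    (List.range n).flatMap (fun x => if lo ≤ x ∧ x < hi then [f x] else []) =
      (List.range (min hi n - lo)).map (fun t => f (lo + t)) := by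
  induction n with
  | zero => simp [show min hi 0 - lo = 0 by omega]
  | succ n ih =>
    rw [List.range_succ, List.flatMap_append, ih]
    by_cases h : lo ≤ n ∧ n < hi
    · have h1 : min hi (n + 1) - lo = (min hi n - lo) + 1 := by omega
      rw [h1, List.range_succ, List.map_append]
      simp [h, show lo + (min hi n - lo) = n by omega]
    · have h1 : min hi (n + 1) - lo = min hi n - lo := by omega
      simp [h1, h]

theorem diag1A_eq (g : List String) (n : Nat) :
    ∀ m x y acc, n - max x y = m →
      pvDiag1A g n x y acc = acc ++ (List.range m).map (fun t => pvCellA g (x + t) (y + t)) := by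
  intro m
  induction m with
  | zero =>
    intro x y acc h
    rw [pvDiag1A, dif_neg (by omega)]
    simp
  | succ m ih =>
    intro x y acc h
    rw [pvDiag1A, dif_pos (by omega : x < n ∧ y < n), ih (x + 1) (y + 1) _ (by omega)]
    rw [List.range_succ_eq_map, List.map_cons, List.map_map]
    have hmap : ∀ t ∈ List.range m,
        pvCellA g (x + 1 + t) (y + 1 + t) = pvCellA g (x + Nat.succ t) (y + Nat.succ t) := by
      intro t _; congr 1 <;> omega
    simp only [List.append_assoc, List.singleton_append, List.cons_append]  -- align
    rw [List.map_congr_left hmap]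
    simp [Function.comp]

theorem diag2A_eq (g : List String) (n : Nat) :
    ∀ m x (y : Int) acc, -1 ≤ y → min (n - x) (y + 1).toNat = m →
      pvDiag2A g n x y acc = acc ++ (List.range m).map (fun t => pvCellA g (x + t) (y.toNat - t)) := by
  intro m
  induction m with
  | zero =>
    intro x y acc hy h
    rw [pvDiag2A, dif_neg (by omega)]
    simp
  | succ m ih =>
    intro x y acc hy h
    rw [pvDiag2A, dif_pos (by omega : x < n ∧ 0 ≤ y),
      ih (x + 1) (y - 1) _ (by omega) (by omega)]
    rw [List.range_succ_eq_map, List.map_cons, List.map_map]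
    have hmap : ∀ t ∈ List.range m,
        pvCellA g (x + 1 + t) ((y - 1).toNat - t) = pvCellA g (x + Nat.succ t) (y.toNat - Nat.succ t) := by
      intro t _; congr 1 <;> omega
    simp only [List.append_assoc, List.singleton_append, List.cons_append]
    rw [List.map_congr_left hmap]
    simp [Function.comp]


def pvPairs (key : Nat → Nat → Int) (g : List String) (n : Nat) : List (Int × Char) :=
  (List.range n).flatMap (fun x => (List.range n).map (fun y => (key x y, pvCellA g x y)))

theorem dd_split (g : List String) (m : List Nat) (l : List Nat)
    (a b : PySem.Dict Int (List Char)) :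
    l.foldl (fun dd x => m.foldl (fun dd y =>
        (dd.1.modify ((x : Int) - (y : Int)) [] (· ++ [pvCellA g x y]),
         dd.2.modify ((x : Int) + (y : Int)) [] (· ++ [pvCellA g x y]))) dd) (a, b)
      = (l.foldl (fun d x => m.foldl (fun d y =>
            d.modify ((x : Int) - (y : Int)) [] (· ++ [pvCellA g x y])) d) a,
         l.foldl (fun d x => m.foldl (fun d y =>
            d.modify ((x : Int) + (y : Int)) [] (· ++ [pvCellA g x y])) d) b) := by
  induction l generalizing a b with
  | nil => rfl
  | cons hd tl ih =>
    simp only [List.foldl_cons]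
    rw [PySem.List.foldl_prod_mk
      (f := fun (d : PySem.Dict Int (List Char)) (y : Nat) =>
        d.modify ((hd : Int) - (y : Int)) [] (· ++ [pvCellA g hd y]))
      (g := fun (d : PySem.Dict Int (List Char)) (y : Nat) =>
        d.modify ((hd : Int) + (y : Int)) [] (· ++ [pvCellA g hd y]))]
    exact ih _ _

theorem dd_eq (g : List String) (n : Nat) :
    ((List.range n).foldl (fun dd x =>
      (List.range n).foldl (fun dd y =>
        (dd.1.modify ((x : Int) - (y : Int)) [] (· ++ [pvCellA g x y]),
         dd.2.modify ((x : Int) + (y : Int)) [] (· ++ [pvCellA g x y]))) dd)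
    ((PySem.Dict.empty, PySem.Dict.empty) :
      PySem.Dict Int (List Char) × PySem.Dict Int (List Char)))
    = ((pvPairs (fun x y => (x : Int) - y) g n).foldl
         (fun d p => d.modify p.1 [] (· ++ [p.2])) PySem.Dict.empty,
       (pvPairs (fun x y => (x : Int) + y) g n).foldl
         (fun d p => d.modify p.1 [] (· ++ [p.2])) PySem.Dict.empty) := by
  rw [dd_split g (List.range n) (List.range n) PySem.Dict.empty PySem.Dict.empty]
  simp only [pvPairs, List.foldl_flatMap, List.foldl_map]

theorem filter_flatMap' {α β : Type} (l : List α) (f : α → List β) (p : β → Bool) :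
    (l.flatMap f).filter p = l.flatMap (fun a => (f a).filter p) := by
  induction l with
  | nil => rfl
  | cons a l ih => simp [List.flatMap_cons, List.filter_append, ih]

theorem bucket_getD (key : Nat → Nat → Int) (g : List String) (n : Nat) (k : Int) :
    (((pvPairs key g n).foldl (fun d p => d.modify p.1 [] (· ++ [p.2]))
        PySem.Dict.empty)).getD k []
    = (List.range n).flatMap (fun x =>
        ((List.range n).filter (fun y => key x y == k)).map (fun y => pvCellA g x y)) := by
  rw [PySem.Dict.getD_foldl_modify_append, pvPairs, filter_flatMap']
  simp [List.map_flatMap, List.filter_map, List.map_map, Function.comp_def]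

theorem map_if_single {α β : Type} (f : α → β) (c : Prop) [Decidable c] (a : α) :
    (if c then [a] else ([] : List α)).map f = if c then [f a] else [] := by
  split <;> simp

theorem filter_key_sub (n x i : Nat) :
    (List.range n).filter (fun (y : Nat) => ((x : Int) - (y : Int) == (i : Int))) =
      if i ≤ x ∧ x < n + i then [x - i] else [] := by
  induction n with
  | zero => rw [List.range_zero, List.filter_nil, if_neg (by omega)]
  | succ n ih =>
    rw [List.range_succ, List.filter_append, ih]
    by_cases hx : x = n + i
    · have hb : ((x : Int) - (n : Int) == (i : Int)) = true := by
        rw [beq_iff_eq]; omega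
      rw [if_neg (by omega)]
      simp only [List.filter_cons, hb, List.filter_nil, List.nil_append, if_true]
      rw [if_pos (by omega)]
      simp [hx]
    · have hb : ((x : Int) - (n : Int) == (i : Int)) = false := by
        rw [beq_eq_false_iff_ne]; intro hEq; apply hx; omega
      simp only [List.filter_cons, hb, List.filter_nil, List.append_nil, Bool.false_eq_true,
        if_false]
      by_cases h2 : i ≤ x ∧ x < n + i
      · rw [if_pos h2, if_pos (by omega)]
      · rw [if_neg h2, if_neg (by omega)]

theorem filter_key_sub_neg (n x j : Nat) :
    (List.range n).filter (fun (y : Nat) => ((x : Int) - (y : Int) == -(j : Int))) =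
      if 0 ≤ x ∧ x < n - j then [x + j] else [] := by
  induction n with
  | zero => rw [List.range_zero, List.filter_nil, if_neg (by omega)]
  | succ n ih =>
    rw [List.range_succ, List.filter_append, ih]
    by_cases hx : x + j = n
    · have hb : ((x : Int) - (n : Int) == -(j : Int)) = true := by
        rw [beq_iff_eq]; omega
      rw [if_neg (by omega)]
      simp only [List.filter_cons, hb, List.filter_nil, List.nil_append, if_true]
      rw [if_pos (by omega)]
      simp [hx]
    · have hb : ((x : Int) - (n : Int) == -(j : Int)) = false := by
        rw [beq_eq_false_iff_ne]; intro hEq; apply hx; omega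
      simp only [List.filter_cons, hb, List.filter_nil, List.append_nil, Bool.false_eq_true,
        if_false]
      by_cases h2 : 0 ≤ x ∧ x < n - j
      · rw [if_pos h2, if_pos (by omega)]
      · rw [if_neg h2, if_neg (by omega)]

theorem filter_key_add (n x c : Nat) :
    (List.range n).filter (fun (y : Nat) => ((x : Int) + (y : Int) == (c : Int))) =
      if c + 1 - n ≤ x ∧ x < c + 1 then [c - x] else [] := by
  induction n with
  | zero => rw [List.range_zero, List.filter_nil, if_neg (by omega)]
  | succ n ih =>
    rw [List.range_succ, List.filter_append, ih]
    by_cases hx : x + n = c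
    · have hb : ((x : Int) + (n : Int) == (c : Int)) = true := by
        rw [beq_iff_eq]; omega
      rw [if_neg (by omega)]
      simp only [List.filter_cons, hb, List.filter_nil, List.nil_append, if_true]
      rw [if_pos (by omega)]
      simp [show c - x = n by omega]
    · have hb : ((x : Int) + (n : Int) == (c : Int)) = false := by
        rw [beq_eq_false_iff_ne]; intro hEq; apply hx; omega
      simp only [List.filter_cons, hb, List.filter_nil, List.append_nil, Bool.false_eq_true,
        if_false]
      by_cases h2 : c + 1 - n ≤ x ∧ x < c + 1
      · rw [if_pos h2, if_pos (by omega)]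
      · rw [if_neg h2, if_neg (by omega)]

theorem F1_pos (g : List String) (n i : Nat) :
    (((pvPairs (fun x y => (x : Int) - y) g n).foldl
        (fun d p => d.modify p.1 [] (· ++ [p.2])) PySem.Dict.empty)).getD (i : Int) []
      = (List.range (n - i)).map (fun t => pvCellA g (i + t) t) := by
  rw [bucket_getD]
  have h1 : (List.range n).flatMap (fun (x : Nat) =>
        ((List.range n).filter (fun (y : Nat) => ((x : Int) - (y : Int) == (i : Int)))).map
          (fun y => pvCellA g x y))
      = (List.range n).flatMap (fun (x : Nat) =>
        if i ≤ x ∧ x < n + i then [pvCellA g x (x - i)] else []) := by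
    rw [List.flatMap_def, List.flatMap_def]
    exact congrArg List.flatten (List.map_congr_left (fun x _ => by
      rw [filter_key_sub, map_if_single]))
  rw [h1, flatMap_range_if (fun x => pvCellA g x (x - i)) i (n + i) n,
    show min (n + i) n - i = n - i by omega]
  exact List.map_congr_left (fun t ht => by congr 1; omega)

theorem F1_neg (g : List String) (n j : Nat) :
    (((pvPairs (fun x y => (x : Int) - y) g n).foldl
        (fun d p => d.modify p.1 [] (· ++ [p.2])) PySem.Dict.empty)).getD (-(j : Int)) []
      = (List.range (n - j)).map (fun t => pvCellA g t (j + t)) := by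
  rw [bucket_getD]
  have h1 : (List.range n).flatMap (fun (x : Nat) =>
        ((List.range n).filter (fun (y : Nat) => ((x : Int) - (y : Int) == -(j : Int)))).map
          (fun y => pvCellA g x y))
      = (List.range n).flatMap (fun (x : Nat) =>
        if 0 ≤ x ∧ x < n - j then [pvCellA g x (x + j)] else []) := by
    rw [List.flatMap_def, List.flatMap_def]
    exact congrArg List.flatten (List.map_congr_left (fun x _ => by
      rw [filter_key_sub_neg, map_if_single]))
  rw [h1, flatMap_range_if (fun x => pvCellA g x (x + j)) 0 (n - j) n,
    show min (n - j) n - 0 = n - j by omega]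
  exact List.map_congr_left (fun t ht => by congr 1 <;> omega)

theorem F2_key (g : List String) (n c : Nat) :
    (((pvPairs (fun x y => (x : Int) + y) g n).foldl
        (fun d p => d.modify p.1 [] (· ++ [p.2])) PySem.Dict.empty)).getD (c : Int) []
      = (List.range (min (c + 1) n - (c + 1 - n))).map
          (fun t => pvCellA g (c + 1 - n + t) (c - (c + 1 - n + t))) := by
  rw [bucket_getD]
  have h1 : (List.range n).flatMap (fun (x : Nat) =>
        ((List.range n).filter (fun (y : Nat) => ((x : Int) + (y : Int) == (c : Int)))).map
          (fun y => pvCellA g x y))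
      = (List.range n).flatMap (fun (x : Nat) =>
        if c + 1 - n ≤ x ∧ x < c + 1 then [pvCellA g x (c - x)] else []) := by
    rw [List.flatMap_def, List.flatMap_def]
    exact congrArg List.flatten (List.map_congr_left (fun x _ => by
      rw [filter_key_add, map_if_single]))
  rw [h1, flatMap_range_if (fun x => pvCellA g x (c - x)) (c + 1 - n) (c + 1) n]

-- A builds each column by foldl-appending single characters; B maps and joins: same list.
theorem colonnes_eq (g : List String) (len0 : Nat) :
    (fun i => String.ofList ((List.range len0).foldl (fun acc l => acc ++ [pvCellA g l i]) []))
    = (fun i => String.ofList ((List.range len0).map (fun l => pvCellA g l i))) := by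
  funext i
  rw [PySem.List.foldl_append_singleton_eq_map, List.nil_append]

theorem cell_congr (g : List String) {a a' b b' : Nat} (h1 : a = a') (h2 : b = b') :
    pvCellA g a b = pvCellA g a' b' := by rw [h1, h2]

theorem dhg_eq (g : List String) (n : Nat) (hn : 0 < n) :
    ((List.range n).reverse.map (fun i => String.ofList (pvDiag1A g n i 0 [])))
      ++ ((List.range' 1 (n - 1)).map (fun j => String.ofList (pvDiag1A g n 0 j [])))
    = (PySem.List.pyRange ((n : Int) - 1) (-(n : Int)) (-1)).map
        (fun k => String.ofList ((((pvPairs (fun x y => (x : Int) - y) g n).foldl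
          (fun d p => d.modify p.1 [] (· ++ [p.2])) PySem.Dict.empty)).getD k [])) := by
  rw [PySem.List.pyRange_neg_one,
    show (((n : Int) - 1) - (-(n : Int))).toNat = n + (n - 1) by omega,
    List.range_add]
  simp only [List.map_append, List.map_map]
  congr 1
  · rw [reverse_range, List.map_map]
    apply List.map_congr_left
    intro t ht
    simp only [List.mem_range] at ht
    simp only [Function.comp]
    rw [show ((n : Int) - 1 - (t : Int)) = ((n - 1 - t : Nat) : Int) by omega,
      F1_pos g n (n - 1 - t),
      diag1A_eq g n (n - max (n - 1 - t) 0) (n - 1 - t) 0 [] rfl, List.nil_append]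
    congr 1
    rw [show n - max (n - 1 - t) 0 = n - (n - 1 - t) by omega]
    exact List.map_congr_left (fun s _ => cell_congr g (by omega) (by omega))
  · rw [List.range'_eq_map_range, List.map_map]
    apply List.map_congr_left
    intro s hs
    simp only [List.mem_range] at hs
    simp only [Function.comp]
    rw [show ((n : Int) - 1 - ((n + s : Nat) : Int)) = -(((s + 1 : Nat)) : Int) by omega,
      F1_neg g n (s + 1),
      diag1A_eq g n (n - max 0 (1 + s)) 0 (1 + s) [] rfl, List.nil_append]
    congr 1
    rw [show n - max 0 (1 + s) = n - (s + 1) by omega]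
    exact List.map_congr_left (fun t _ => cell_congr g (by omega) (by omega))

theorem dhd_eq (g : List String) (n : Nat) (hn : 0 < n) :
    ((List.range n).reverse.map (fun i => String.ofList (pvDiag2A g n i ((n : Int) - 1) [])))
      ++ ((List.range (n - 1)).reverse.map
          (fun (j : Nat) => String.ofList (pvDiag2A g n 0 (j : Int) [])))
    = (PySem.List.pyRange (2 * (n : Int) - 2) (-1) (-1)).map
        (fun k => String.ofList ((((pvPairs (fun x y => (x : Int) + y) g n).foldl
          (fun d p => d.modify p.1 [] (· ++ [p.2])) PySem.Dict.empty)).getD k [])) := by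
  rw [PySem.List.pyRange_neg_one,
    show ((2 * (n : Int) - 2) - (-1 : Int)).toNat = n + (n - 1) by omega,
    List.range_add]
  simp only [List.map_append, List.map_map]
  congr 1
  · rw [reverse_range, List.map_map]
    apply List.map_congr_left
    intro t ht
    simp only [List.mem_range] at ht
    simp only [Function.comp]
    rw [show (2 * (n : Int) - 2 - (t : Int)) = ((2 * n - 2 - t : Nat) : Int) by omega,
      F2_key g n (2 * n - 2 - t),
      diag2A_eq g n (min (n - (n - 1 - t)) (((n : Int) - 1) + 1).toNat) (n - 1 - t)
        ((n : Int) - 1) [] (by omega) rfl, List.nil_append]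
    congr 1
    rw [show min (n - (n - 1 - t)) (((n : Int) - 1) + 1).toNat
        = min (2 * n - 2 - t + 1) n - (2 * n - 2 - t + 1 - n) by omega]
    exact List.map_congr_left (fun s _ => cell_congr g (by omega) (by omega))
  · rw [reverse_range, List.map_map]
    apply List.map_congr_left
    intro s hs
    simp only [List.mem_range] at hs
    simp only [Function.comp]
    rw [show (2 * (n : Int) - 2 - ((n + s : Nat) : Int)) = ((n - 2 - s : Nat) : Int) by omega,
      F2_key g n (n - 2 - s),
      diag2A_eq g n (min (n - 0) (((n - 1 - 1 - s : Nat) : Int) + 1).toNat) 0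
        ((n - 1 - 1 - s : Nat) : Int) [] (by omega) rfl, List.nil_append]
    congr 1
    rw [show min (n - 0) (((n - 1 - 1 - s : Nat) : Int) + 1).toNat
        = min (n - 2 - s + 1) n - (n - 2 - s + 1 - n) by omega]
    exact List.map_congr_left (fun t _ => cell_congr g (by omega) (by omega))

theorem main_eq (grid mots : List String) (hpre : Pre_prepare_grid grid mots) :
    prepare_grid grid mots = prepare_grid_alt grid mots := by
  by_cases hg0 : grid = []
  · subst hg0; rfl
  · have hn : 0 < grid.length := List.length_pos_iff.mpr hg0
    simp only [prepare_grid, prepare_grid_alt]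
    rw [dd_eq]
    refine Prod.ext ?_ (Prod.ext ?_ ?_)
    · exact congrArg ((List.range grid.length).map)
        (colonnes_eq (grid.map pvStripA) (((grid.map pvStripA)[0]?.getD "").toList.length))
    · simpa using dhg_eq (grid.map pvStripA) grid.length hn
    · simpa using dhd_eq (grid.map pvStripA) grid.length hn

-- ===== VERDICT (by name: the statement is the Claim_ definition above) =====
theorem prepare_grid_spec : Claim_equal_prepare_grid := by
  intro grid mots _ hpre
  show prepare_grid grid mots = prepare_grid_alt grid mots
  exact main_eq grid mots hpre
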